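-- pv_equiv track=rewrite | github.com/raikhovn/flask_app | tests.py | balance_ints
-- ===== SOURCE A (Python) =====
-- from collections import Counter
--
-- def balance_ints(n: [int]) ->dict:
--     cnt = Counter(n)
--     mx = max(cnt[c] for c in cnt)
--     bal = {}
--     for c in cnt:
--         if cnt[c] < mx:
--             bal[c] = mx - cnt[c]
--     return bal
-- ===== SOURCE B (Python) =====
-- def balance_ints(n):
--     # Partition into runs of equal values by repeated filtering (first-occurrence order),
--     # counting each value as the length shrink; no Counter / hash-count dict.
--     pairs = []
--     rest = list(n)
--     while rest:
--         x = rest[0]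
--         nxt = [y for y in rest if y != x]
--         pairs.append((x, len(rest) - len(nxt)))
--         rest = nxt
--     mx = max(c for _, c in pairs)
--     return {v: mx - c for v, c in pairs if c < mx}
-- ===== Notes on version B (the rewrite author's own statement) =====
-- stated objective: alternative
-- what changed: Replaces Counter's hash-based frequency index by repeated partitioning: peel off the run of the first value with a filter, counting it as the length shrink, then take the max over the collected (value,count) pairs and emit the deficits; no counting dict is ever built.
import Mathlib
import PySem

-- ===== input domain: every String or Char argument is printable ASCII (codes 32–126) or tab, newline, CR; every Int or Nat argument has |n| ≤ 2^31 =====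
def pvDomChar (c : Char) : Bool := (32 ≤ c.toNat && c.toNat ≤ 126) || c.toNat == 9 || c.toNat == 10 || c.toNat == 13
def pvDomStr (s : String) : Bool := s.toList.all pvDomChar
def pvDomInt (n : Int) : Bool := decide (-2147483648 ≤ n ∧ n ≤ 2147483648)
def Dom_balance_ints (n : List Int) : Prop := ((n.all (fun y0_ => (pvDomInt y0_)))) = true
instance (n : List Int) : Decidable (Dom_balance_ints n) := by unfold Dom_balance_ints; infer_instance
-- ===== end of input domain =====

-- B replaces Counter's hash-count by repeated partitioning (peel off each first value's occurrences
-- with a filter, count = length shrink), then max over the pairs; alternative algorithm, not faster.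


-- ===== PORT A =====
-- cnt = Counter(n); mx = max(cnt[c] for c in cnt)  (max of an empty generator raises: Pre_ excludes
-- n = [], so the .getD 0 default is never reached); then the filter loop over cnt's keys.
def balance_ints (n : List Int) : List (Int × Int) :=
  let cnt : PySem.Dict Int Int := PySem.Dict.counter n
  let mx : Int := (PySem.List.max? (cnt.keys.map (fun c => cnt.getD c 0)) (fun x => x)).getD 0
  (cnt.keys.foldl
    (fun (bal : PySem.Dict Int Int) c =>
      if cnt.getD c 0 < mx then bal.insert c (mx - cnt.getD c 0) else bal)
    PySem.Dict.empty).items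

-- ===== PORT B =====
-- the while loop: peel off all occurrences of the first element; count = length shrink
def pvRuns : List Int → List (Int × Int)
  | [] => []
  | x :: xs =>
    (x, ((x :: xs).length : Int) - ((xs.filter (fun y => y ≠ x)).length : Int))
      :: pvRuns (xs.filter (fun y => y ≠ x))
termination_by l => l.length
decreasing_by
  simp only [List.length_cons, List.length_unattach]
  exact Nat.lt_succ_of_le (le_trans (List.length_filter_le _ _) (by simp))

-- mx = max(c for _, c in pairs)  (raises on an empty input: outside Pre_); then the dict comprehension.
def balance_ints_alt (n : List Int) : List (Int × Int) :=
  let pairs := pvRuns n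
  let mx : Int := (PySem.List.max? (pairs.map (fun p => p.2)) (fun x => x)).getD 0
  (pairs.filter (fun p => p.2 < mx)).map (fun p => (p.1, mx - p.2))

-- ===== PRECONDITION & SPEC =====
-- Pre_ excludes only the empty list, on which A raises ValueError (max of an empty generator); B raises too.
def Pre_balance_ints (n : List Int) : Prop := n ≠ []
instance (n : List Int) : Decidable (Pre_balance_ints n) := by unfold Pre_balance_ints; infer_instance
def pvWitness_balance_ints : List Int := [1, 1, 2]

def Spec_balance_ints (n : List Int) (out : List (Int × Int)) : Prop := out = balance_ints_alt n
instance (n : List Int) (out : List (Int × Int)) : Decidable (Spec_balance_ints n out) := by unfold Spec_balance_ints; infer_instance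

-- ===== CLAIM (what is proved, stated in full; the proofs are below) =====
def Claim_equal_balance_ints : Prop := ∀ (n : List Int), Dom_balance_ints n → Pre_balance_ints n → Spec_balance_ints n (balance_ints n)

-- ===== LEMMAS AND PROOFS =====

lemma pvCount_filter_len (l : List Int) (x : Int) :
    l.count x + (l.filter (fun y => y ≠ x)).length = l.length := by
  induction l with
  | nil => simp
  | cons a t ih =>
    simp only [ne_eq, decide_not] at ih ⊢
    by_cases h : a = x
    · subst h; simp; omega
    · simp [h]; omega

lemma pvCount_filter_ne (l : List Int) (x k : Int) (hk : k ≠ x) :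
    (l.filter (fun y => y ≠ x)).count k = l.count k := by
  induction l with
  | nil => simp
  | cons a t ih =>
    simp only [ne_eq, decide_not] at ih ⊢
    by_cases h : a = x
    · subst h; simp [Ne.symm hk, ih]
    · simp [List.count_cons, h, ih]

lemma pvOfList_filter (l : List Int) (p : Int → Bool) :
    PySem.Set.ofList (l.filter p) = (PySem.Set.ofList l).filter p := by
  induction l using List.reverseRecOn with
  | nil => simp
  | append_singleton t a ih =>
    rw [List.filter_append, PySem.Set.ofList_append_singleton, List.filter_cons]
    by_cases h : p a
    · simp only [h, if_pos]
      rw [List.filter_nil, PySem.Set.ofList_append_singleton, ih]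
      by_cases hm : a ∈ PySem.Set.ofList t
      · have hm' : a ∈ (PySem.Set.ofList t).filter p := List.mem_filter.2 ⟨hm, h⟩
        rw [PySem.Set.add_of_mem hm, PySem.Set.add_of_mem hm']
      · have hm' : a ∉ (PySem.Set.ofList t).filter p := fun hc => hm (List.mem_filter.1 hc).1
        rw [PySem.Set.add_of_not_mem hm, PySem.Set.add_of_not_mem hm', List.filter_append,
          List.filter_cons]
        simp [h]
    · simp only [h, Bool.false_eq_true, if_false]
      rw [List.filter_nil, List.append_nil, ih]
      by_cases hm : a ∈ PySem.Set.ofList t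
      · rw [PySem.Set.add_of_mem hm]
      · rw [PySem.Set.add_of_not_mem hm, List.filter_append, List.filter_cons]
        simp [h]

lemma pvOfList_cons_filter (x : Int) (xs : List Int) :
    PySem.Set.ofList (x :: xs) = x :: (PySem.Set.ofList (x :: xs)).filter (fun y => y ≠ x) := by
  have hnd : (PySem.Set.ofList (x :: xs)).Nodup := PySem.Set.nodup_ofList _
  rw [PySem.Set.ofList_cons] at hnd ⊢
  have hx : x ∉ PySem.Set.discard (PySem.Set.ofList xs) x := (List.nodup_cons.1 hnd).1
  rw [List.filter_cons]
  simp only [ne_eq, not_true_eq_false, decide_false, Bool.false_eq_true, if_false]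
  congr 1
  refine (List.filter_eq_self.2 (fun a ha => ?_)).symm
  have : a ≠ x := fun he => hx (he ▸ ha)
  simp [this]

lemma pvRuns_eq (l : List Int) :
    pvRuns l = (PySem.Set.ofList l).map (fun k => (k, (l.count k : Int))) := by
  generalize hm : l.length = m
  induction m using Nat.strong_induction_on generalizing l with
  | _ m ih =>
    cases l with
    | nil => simp [pvRuns]
    | cons x xs =>
      have hlen : (xs.filter (fun y => y ≠ x)).length < m := by
        subst hm
        simp only [List.length_cons]
        exact Nat.lt_succ_of_le (List.length_filter_le _ _)
      have ih' := ih _ hlen (xs.filter (fun y => y ≠ x)) rfl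
      rw [pvRuns, ih']
      have hrest : (x :: xs).filter (fun y => y ≠ x) = xs.filter (fun y => y ≠ x) := by
        rw [List.filter_cons]; simp
      conv_rhs => rw [pvOfList_cons_filter, List.map_cons]
      have hcnt : ((x :: xs).length : Int) - ((xs.filter (fun y => y ≠ x)).length : Int)
          = ((x :: xs).count x : Int) := by
        have := pvCount_filter_len (x :: xs) x
        rw [hrest] at this
        omega
      rw [hcnt]
      congr 1
      rw [← pvOfList_filter, hrest]
      refine List.map_congr_left (fun k hk => ?_)
      have hkx : k ≠ x := by
        have h1 := (PySem.Set.mem_ofList _ _).1 hk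
        have h2 := List.mem_filter.1 h1
        simpa using h2.2
      have h3 := pvCount_filter_ne (x :: xs) x k hkx
      rw [hrest] at h3
      rw [h3]

-- A's filter loop over fresh distinct keys builds exactly the filtered/mapped items
lemma pvFoldIf (l : List Int) (d : PySem.Dict Int Int) (P : Int → Prop) [DecidablePred P] (f : Int → Int)
    (hnd : l.Nodup) (hfresh : ∀ k ∈ l, d.contains k = false) :
    (l.foldl (fun b c => if P c then b.insert c (f c) else b) d).items
      = d.items ++ (l.filter (fun c => decide (P c))).map (fun c => (c, f c)) := by
  induction l generalizing d with
  | nil => simp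
  | cons x t ih =>
    have hndt : t.Nodup := hnd.of_cons
    have hxt : x ∉ t := by simpa using hnd.notMem
    simp only [List.foldl_cons]
    by_cases hp : P x
    · have hfx : d.contains x = false := hfresh x (by simp)
      have hfresh' : ∀ k ∈ t, (d.insert x (f x)).contains k = false := by
        intro k hk
        have hne : k ≠ x := fun he => hxt (he ▸ hk)
        rw [PySem.Dict.contains_insert]
        simp [hne, hfresh k (List.mem_cons_of_mem _ hk)]
      rw [if_pos hp, ih _ hndt hfresh',
          PySem.Dict.items_insert_of_not_contains d (f x) hfx]
      simp [hp]
    · have hfresh' : ∀ k ∈ t, d.contains k = false := fun k hk => hfresh k (List.mem_cons_of_mem _ hk)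
      rw [if_neg hp, ih _ hndt hfresh']
      simp [hp]

-- ===== VERDICT (by name: the statement is the Claim_ definition above) =====
theorem balance_ints_spec : Claim_equal_balance_ints := by
  intro n _ _
  unfold Spec_balance_ints balance_ints balance_ints_alt
  simp only [pvRuns_eq, PySem.Dict.keys_counter, PySem.Dict.getD_counter]
  set s := PySem.Set.ofList n with hs
  set mx := (PySem.List.max? (s.map fun c => ((n.count c : Int))) fun x => x).getD 0 with hmx
  have hmap : (s.map (fun k => (k, (n.count k : Int)))).map (fun p => p.2)
      = s.map (fun c => ((n.count c : Int))) := by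
    rw [List.map_map]; rfl
  rw [hmap, ← hmx]
  have hA := pvFoldIf s PySem.Dict.empty (fun c => (n.count c : Int) < mx)
      (fun c => mx - (n.count c : Int)) (PySem.Set.nodup_ofList n) (by simp [PySem.Dict.empty])
  rw [hA]
  rw [List.filter_map, List.map_map]
  simp [PySem.Dict.empty, Function.comp_def]
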